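-- pv_equiv track=rewrite | github.com/songzy12/CodeJam | kickstart/2018/Round E/A/A.py | solve
-- ===== SOURCE A (Python) =====
-- def solve(N, K, A):
--     A.sort()
--     res = 0
--     cur_day = 1
--     while A:
--         while A and A[0] < cur_day:
--             A.pop(0)
--         while A and res < cur_day * K:
--             res += 1
--             A.pop(0)
--         cur_day += 1
--
--     return res
-- ===== SOURCE B (Python) =====
-- def solve(N, K, A):
--     res = 0
--     for d in sorted(A):
--         if K > 0 and d >= res // K + 1:
--             res += 1
--     return res
-- ===== Notes on version B (the rewrite author's own statement) =====
-- stated objective: faster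
-- what changed: Replaced the day-by-day simulation with front pop(0)s (quadratic pops plus one iteration per idle day up to max deadline) by a single pass over the sorted list that eats item d iff d >= res//K + 1, so the result is computed in one fold after sorting.
import Mathlib
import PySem

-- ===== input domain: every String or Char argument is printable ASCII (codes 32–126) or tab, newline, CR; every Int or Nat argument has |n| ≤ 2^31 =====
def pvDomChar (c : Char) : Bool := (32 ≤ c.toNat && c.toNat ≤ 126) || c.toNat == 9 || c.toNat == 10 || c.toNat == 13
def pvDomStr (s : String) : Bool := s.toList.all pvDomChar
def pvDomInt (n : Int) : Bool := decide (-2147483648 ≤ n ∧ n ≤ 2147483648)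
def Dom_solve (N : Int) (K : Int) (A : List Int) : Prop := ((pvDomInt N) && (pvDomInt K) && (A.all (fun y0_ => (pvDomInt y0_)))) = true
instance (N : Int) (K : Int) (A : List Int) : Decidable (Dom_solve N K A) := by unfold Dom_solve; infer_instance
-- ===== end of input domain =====

-- B replaces A's day-by-day simulation (pop(0) loops, one iteration per idle day) with one
-- fold over the sorted list, eating item d iff d ≥ res//K + 1; faster (O(n log n)).
-- A sorts and empties its argument list in place; B does not mutate it. The equivalence
-- proved here is about the return value only.

-- ===== PORT A =====
-- while A and A[0] < cur_day: A.pop(0)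
def pvDrop (cur : Int) : List Int → List Int
  | [] => []
  | d :: rest => if d < cur then pvDrop cur rest else d :: rest

-- while A and res < cur_day * K: res += 1; A.pop(0)
def pvEat (K cur : Int) : List Int → Int → Int × List Int
  | [], res => (res, [])
  | d :: rest, res => if res < cur * K then pvEat K cur rest (res + 1) else (res, d :: rest)

def pvMax (A : List Int) : Int := A.foldr max 0

-- the outer 'while A:' loop of A, on state (A, res, cur_day); fuel is only a
-- totality guard — solve passes A.length + max(A)⁺ fuel, enough by pvLoop_dec
def pvLoop (K : Int) (fuel : Nat) (A : List Int) (res cur : Int) : Int :=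
  match fuel with
  | 0 => res
  | fuel + 1 =>
    if A = [] then res
    else
      let A1 := pvDrop cur A
      let p := pvEat K cur A1 res
      pvLoop K fuel p.2 p.1 (cur + 1)

def solve (N : Int) (K : Int) (A : List Int) : Int :=
  let S := PySem.List.sorted A (fun x => x) false
  pvLoop K (S.length + (pvMax S).toNat) S 0 1

-- ===== PORT B =====
def solve_alt (N : Int) (K : Int) (A : List Int) : Int :=
  (PySem.List.sorted A (fun x => x) false).foldl
    (fun res d => if 0 < K ∧ PySem.Int.floordiv res K + 1 ≤ d then res + 1 else res) 0

-- ===== PRECONDITION & SPEC =====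
def Spec_solve (N : Int) (K : Int) (A : List Int) (out : Int) : Prop := out = solve_alt N K A
instance (N : Int) (K : Int) (A : List Int) (out : Int) : Decidable (Spec_solve N K A out) := by unfold Spec_solve; infer_instance

-- ===== CLAIM (what is proved, stated in full; the proofs are below) =====
def Claim_equal_solve : Prop := ∀ (N : Int) (K : Int) (A : List Int), Dom_solve N K A → Spec_solve N K A (solve N K A)

-- ===== LEMMAS AND PROOFS =====

-- suffix/measure facts justifying that solve passes pvLoop enough fuel
theorem pvMax_le_of_mem {A : List Int} {d : Int} (h : d ∈ A) : d ≤ pvMax A := by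
  induction A with
  | nil => cases h
  | cons a t ih =>
    rcases List.mem_cons.mp h with rfl | h
    · exact le_max_left _ _
    · exact le_trans (ih h) (le_max_right _ _)

theorem pvDrop_suffix (cur : Int) (A : List Int) : (pvDrop cur A).IsSuffix A := by
  induction A with
  | nil => simp [pvDrop]
  | cons d rest ih =>
    simp only [pvDrop]
    split
    · exact ih.trans (List.suffix_cons d rest)
    · exact List.suffix_rfl

theorem pvEat_suffix (K cur : Int) (A : List Int) (res : Int) :
    (pvEat K cur A res).2.IsSuffix A := by
  induction A generalizing res with
  | nil => simp [pvEat]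
  | cons d rest ih =>
    simp only [pvEat]
    split
    · exact (ih (res + 1)).trans (List.suffix_cons d rest)
    · exact List.suffix_rfl

theorem pvMax_nonneg (A : List Int) : 0 ≤ pvMax A := by
  induction A with
  | nil => simp [pvMax]
  | cons a t ih => simp only [pvMax, List.foldr] at *; omega

theorem pvMax_suffix_le {A B : List Int} (h : A.IsSuffix B) : pvMax A ≤ pvMax B := by
  induction A with
  | nil => exact pvMax_nonneg B
  | cons a t ih =>
    have ha : a ≤ pvMax B := pvMax_le_of_mem (h.subset (by simp))
    have ht : pvMax t ≤ pvMax B := ih ((List.suffix_cons a t).trans h)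
    simp only [pvMax, List.foldr] at *
    omega

theorem pvDrop_head_ge (cur : Int) (A : List Int) (d : Int) (rest : List Int)
    (h : pvDrop cur A = d :: rest) : cur ≤ d := by
  induction A with
  | nil => simp [pvDrop] at h
  | cons a t ih =>
    simp only [pvDrop] at h
    split at h
    · exact ih h
    · cases h; omega

theorem pvLoop_dec (K res cur : Int) (A : List Int) (hA : ¬ A = []) :
    (pvEat K cur (pvDrop cur A) res).2.length
      + (pvMax (pvEat K cur (pvDrop cur A) res).2 + 1 - (cur + 1)).toNat
    < A.length + (pvMax A + 1 - cur).toNat := by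
  have hs : (pvEat K cur (pvDrop cur A) res).2.IsSuffix A :=
    (pvEat_suffix _ _ _ _).trans (pvDrop_suffix _ _)
  have hlen : (pvEat K cur (pvDrop cur A) res).2.length ≤ A.length := hs.length_le
  have hmax : pvMax (pvEat K cur (pvDrop cur A) res).2 ≤ pvMax A := pvMax_suffix_le hs
  have hA0 : 0 < A.length := List.length_pos_iff.mpr hA
  have hMn : 0 ≤ pvMax A := pvMax_nonneg A
  cases h2 : (pvEat K cur (pvDrop cur A) res).2 with
  | nil =>
    have h0 : pvMax ([] : List Int) = 0 := rfl
    rw [h0]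
    simp only [List.length_nil]
    omega
  | cons d rest =>
    have hd : ∃ h rest', pvDrop cur A = h :: rest' := by
      cases hdr : pvDrop cur A with
      | nil => rw [hdr] at h2; simp [pvEat] at h2
      | cons h rest' => exact ⟨h, rest', rfl⟩
    obtain ⟨h, rest', hdr⟩ := hd
    have hcur : cur ≤ h := pvDrop_head_ge cur A h rest' hdr
    have hmem : h ∈ A := (pvDrop_suffix cur A).subset (by rw [hdr]; simp)
    have hMc : cur ≤ pvMax A := le_trans hcur (pvMax_le_of_mem hmem)
    rw [h2] at hlen hmax
    omega


-- abbreviation for B's fold step (proof-side only)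
def pvStep (K res d : Int) : Int :=
  if 0 < K ∧ PySem.Int.floordiv res K + 1 ≤ d then res + 1 else res

theorem pvStep_skip {K res d cur : Int} (hK : 0 < K) (hlo : (cur - 1) * K ≤ res)
    (hhi : res < cur * K) (hd : d < cur) : pvStep K res d = res := by
  have hq : PySem.Int.floordiv res K = cur - 1 := by
    rw [PySem.Int.floordiv_eq_iff_of_pos hK]
    constructor
    · exact hlo
    · have : (cur - 1 + 1) * K = cur * K := by ring
      omega
  simp [pvStep, hq]
  omega

theorem pvStep_eat {K res d cur : Int} (hK : 0 < K) (hlo : (cur - 1) * K ≤ res)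
    (hhi : res < cur * K) (hd : cur ≤ d) : pvStep K res d = res + 1 := by
  have hq : PySem.Int.floordiv res K = cur - 1 := by
    rw [PySem.Int.floordiv_eq_iff_of_pos hK]
    constructor
    · exact hlo
    · have : (cur - 1 + 1) * K = cur * K := by ring
      omega
  simp [pvStep, hq]
  omega

theorem pvStep_skip_nonpos {K res d : Int} (hK : K ≤ 0) : pvStep K res d = res := by
  simp [pvStep]; omega

-- the fold ignores the prefix that pvDrop removes (K > 0, res = (cur-1)*K)
theorem pvDrop_fold {K cur res : Int} (hK : 0 < K) (hres : res = (cur - 1) * K)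
    (A : List Int) :
    A.foldl (pvStep K) res = (pvDrop cur A).foldl (pvStep K) res := by
  induction A with
  | nil => rfl
  | cons d rest ih =>
    simp only [pvDrop]
    split
    · rename_i hd
      have hskip : pvStep K res d = res := by
        apply pvStep_skip hK (by omega) _ hd
        nlinarith
      simp [List.foldl, hskip, ih]
    · rfl

-- pvEat vs the fold: every eaten item is counted by the fold, and the exit state is tight
theorem pvEat_fold {K cur : Int} (hK : 0 < K) (A : List Int) :
    ∀ res, (∀ d ∈ A, cur ≤ d) → (cur - 1) * K ≤ res → res ≤ cur * K →
    A.foldl (pvStep K) res = (pvEat K cur A res).2.foldl (pvStep K) (pvEat K cur A res).1 ∧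
    ((pvEat K cur A res).2 = [] ∨
      ((pvEat K cur A res).1 = cur * K ∧ (∀ d ∈ (pvEat K cur A res).2, cur ≤ d))) := by
  induction A with
  | nil => intro res _ _ _; exact ⟨rfl, Or.inl rfl⟩
  | cons d rest ih =>
    intro res hall hlo hhi
    simp only [pvEat]
    split
    · rename_i hlt
      have heat : pvStep K res d = res + 1 :=
        pvStep_eat hK hlo hlt (hall d (by simp))
      have := ih (res + 1) (fun x hx => hall x (by simp [hx])) (by omega) (by omega)
      simpa [List.foldl, heat] using this
    · rename_i hnlt
      refine ⟨rfl, Or.inr ⟨by omega, hall⟩⟩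

-- a sorted list starting at d ≥ cur is entirely ≥ cur
theorem pvAll_ge_of_sorted_head {cur d : Int} {rest : List Int}
    (hp : (d :: rest).Pairwise (· ≤ ·)) (hd : cur ≤ d) :
    ∀ x ∈ d :: rest, cur ≤ x := by
  intro x hx
  rcases List.mem_cons.mp hx with rfl | hx
  · exact hd
  · exact le_trans hd ((List.pairwise_cons.mp hp).1 x hx)

-- with no capacity left (res ≥ cur*K) pvEat is the identity
theorem pvEat_id {K cur res : Int} (h : ¬ res < cur * K) (A : List Int) :
    pvEat K cur A res = (res, A) := by
  cases A with
  | nil => rfl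
  | cons d rest => simp [pvEat, h]

-- main invariant for K > 0: at day cur, res = (cur-1)*K (or the list is empty)
theorem pvLoop_fold_pos (K : Int) (hK : 0 < K) :
    ∀ (fuel : Nat) (A : List Int) (res cur : Int),
      A.length + (pvMax A + 1 - cur).toNat ≤ fuel →
      A.Pairwise (· ≤ ·) → (A = [] ∨ res = (cur - 1) * K) →
      pvLoop K fuel A res cur = A.foldl (pvStep K) res := by
  intro fuel
  induction fuel with
  | zero =>
    intro A res cur hf _ _
    have hA : A = [] := by
      cases A with
      | nil => rfl
      | cons d t => simp at hf
    subst hA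
    rfl
  | succ fuel ih =>
    intro A res cur hf hs hinv
    by_cases hA : A = []
    · subst hA; simp [pvLoop]
    · simp only [pvLoop, if_neg hA]
      rcases hinv with rfl | hres
      · exact absurd rfl hA
      have hdropf := pvDrop_fold hK hres A
      have hs1 : (pvDrop cur A).Pairwise (· ≤ ·) :=
        hs.sublist (pvDrop_suffix cur A).sublist
      have hge : ∀ x ∈ pvDrop cur A, cur ≤ x := by
        cases hdr : pvDrop cur A with
        | nil => simp
        | cons d rest' =>
          rw [hdr] at hs1
          exact pvAll_ge_of_sorted_head hs1 (pvDrop_head_ge cur A d rest' hdr)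
      have heat := pvEat_fold hK (pvDrop cur A) res hge (le_of_eq hres.symm)
        (by nlinarith)
      have hs2 : (pvEat K cur (pvDrop cur A) res).2.Pairwise (· ≤ ·) :=
        hs1.sublist (pvEat_suffix K cur (pvDrop cur A) res).sublist
      have hinv2 : (pvEat K cur (pvDrop cur A) res).2 = [] ∨
          (pvEat K cur (pvDrop cur A) res).1 = (cur + 1 - 1) * K := by
        rcases heat.2 with h | h
        · exact Or.inl h
        · exact Or.inr (by rw [h.1]; ring)
      have hf2 : (pvEat K cur (pvDrop cur A) res).2.length +
          (pvMax (pvEat K cur (pvDrop cur A) res).2 + 1 - (cur + 1)).toNat ≤ fuel := by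
        have := pvLoop_dec K res cur A hA
        omega
      rw [ih _ _ _ hf2 hs2 hinv2, hdropf, heat.1]

theorem pvLoop_nonpos (K : Int) (hK : K ≤ 0) :
    ∀ (fuel : Nat) (A : List Int) (res cur : Int), 1 ≤ cur → 0 ≤ res →
      pvLoop K fuel A res cur = res := by
  intro fuel
  induction fuel with
  | zero => intro A res cur _ _; rfl
  | succ fuel ih =>
    intro A res cur hcur hres
    by_cases hA : A = []
    · subst hA; simp [pvLoop]
    · simp only [pvLoop, if_neg hA]
      have hid : pvEat K cur (pvDrop cur A) res = (res, pvDrop cur A) :=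
        pvEat_id (by nlinarith) (pvDrop cur A)
      rw [hid]
      exact ih _ _ _ (by omega) hres

-- the fold returns its initial value when K ≤ 0
theorem pvFold_zero {K : Int} (hK : K ≤ 0) (A : List Int) (res : Int) :
    A.foldl (pvStep K) res = res := by
  induction A generalizing res with
  | nil => rfl
  | cons d rest ih => simp [List.foldl, pvStep_skip_nonpos hK, ih]

theorem solve_alt_eq (N K : Int) (A : List Int) :
    solve_alt N K A = (PySem.List.sorted A (fun x => x) false).foldl (pvStep K) 0 := rfl

-- ===== VERDICT (by name: the statement is the Claim_ definition above) =====
theorem solve_spec : Claim_equal_solve := by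
  intro N K A _
  unfold Spec_solve solve
  rw [solve_alt_eq]
  rcases lt_or_ge 0 K with hK | hK
  · refine pvLoop_fold_pos K hK _ _ 0 1 ?_
      (by simpa using PySem.List.sorted_pairwise A (fun x => x))
      (Or.inr (by ring))
    have := pvMax_nonneg (PySem.List.sorted A (fun x => x) false)
    omega
  · rw [pvLoop_nonpos K hK _ _ 0 1 le_rfl le_rfl, pvFold_zero hK]
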